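-- pv_equiv track=rewrite | github.com/CMcHugh1126/FinalProjectGitHub | FinalProject.py | calculate_bonus
-- ===== SOURCE A (Python) =====
-- def calculate_bonus(rolls):
--     bonus_points = 0
--     if 6 in rolls:
--         bonus_points += rolls.count(6) * 5
--     if all(d % 2 == 0 for d in rolls):
--         bonus_points += 10
--     if sorted(rolls) == [1, 2, 3]:
--         bonus_points += 15
--     return bonus_points
--     "Function calculates bonus points based on specific conditions: rolling a 6, all even numbers, or the sequence [1, 2, 3]. Adds strategic opportunities for players."
-- ===== SOURCE B (Python) =====
-- def calculate_bonus(rolls):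
--     c1 = c2 = c3 = c6 = n = 0
--     all_even = True
--     for d in rolls:
--         n += 1
--         if d % 2 != 0:
--             all_even = False
--         if d == 1:
--             c1 += 1
--         elif d == 2:
--             c2 += 1
--         elif d == 3:
--             c3 += 1
--         elif d == 6:
--             c6 += 1
--     bonus = c6 * 5
--     if all_even:
--         bonus += 10
--     if n == 3 and c1 == 1 and c2 == 1 and c3 == 1:
--         bonus += 15
--     return bonus
-- ===== Notes on version B (the rewrite author's own statement) =====
-- stated objective: faster
-- what changed: Replaces A's four separate traversals (membership test, count, all-even generator and a sort compared to [1,2,3]) with one fused loop accumulating counts of 1/2/3/6, the length and an all-even flag, deriving all three bonuses from that tally.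
import Mathlib
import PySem

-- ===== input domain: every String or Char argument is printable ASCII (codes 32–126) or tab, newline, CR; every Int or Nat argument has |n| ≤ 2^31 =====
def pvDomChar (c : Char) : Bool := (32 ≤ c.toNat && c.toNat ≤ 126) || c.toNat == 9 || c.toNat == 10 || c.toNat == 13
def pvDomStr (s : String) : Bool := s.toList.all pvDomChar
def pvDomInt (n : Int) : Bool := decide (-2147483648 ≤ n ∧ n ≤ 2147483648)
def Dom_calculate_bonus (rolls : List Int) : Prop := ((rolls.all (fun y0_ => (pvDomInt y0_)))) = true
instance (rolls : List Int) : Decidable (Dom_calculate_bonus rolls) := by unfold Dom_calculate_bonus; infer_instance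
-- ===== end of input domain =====

-- B replaces A's four traversals (membership, count, all-even, sort-and-compare) by one fused counting pass; objective: faster (measured).

-- ===== PORT A =====
def calculate_bonus (rolls : List Int) : Int :=
  let bonus_points : Int := 0
  let bonus_points := if rolls.contains 6 then bonus_points + (PySem.List.count rolls 6 : Int) * 5 else bonus_points
  let bonus_points := if rolls.all (fun d => PySem.Int.mod d 2 == 0) then bonus_points + 10 else bonus_points
  let bonus_points := if PySem.List.sorted rolls (fun x => x) false == [1, 2, 3] then bonus_points + 15 else bonus_points
  bonus_points

-- ===== PORT B =====
def pvStepB (st : Int × Int × Int × Int × Int × Bool) (d : Int) : Int × Int × Int × Int × Int × Bool :=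
  let (c1, c2, c3, c6, n, ae) := st
  let n := n + 1
  let ae := if PySem.Int.mod d 2 != 0 then false else ae
  if d == 1 then (c1 + 1, c2, c3, c6, n, ae)
  else if d == 2 then (c1, c2 + 1, c3, c6, n, ae)
  else if d == 3 then (c1, c2, c3 + 1, c6, n, ae)
  else if d == 6 then (c1, c2, c3, c6 + 1, n, ae)
  else (c1, c2, c3, c6, n, ae)

def calculate_bonus_alt (rolls : List Int) : Int :=
  let st := rolls.foldl pvStepB (0, 0, 0, 0, 0, true)
  let bonus := st.2.2.2.1 * 5
  let bonus := if st.2.2.2.2.2 then bonus + 10 else bonus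
  let bonus := if st.2.2.2.2.1 == 3 && st.1 == 1 && st.2.1 == 1 && st.2.2.1 == 1 then bonus + 15 else bonus
  bonus

-- ===== PRECONDITION & SPEC =====
def Spec_calculate_bonus (rolls : List Int) (out : Int) : Prop := out = calculate_bonus_alt rolls
instance (rolls : List Int) (out : Int) : Decidable (Spec_calculate_bonus rolls out) := by unfold Spec_calculate_bonus; infer_instance

-- ===== CLAIM (what is proved, stated in full; the proofs are below) =====
def Claim_equal_calculate_bonus : Prop := ∀ (rolls : List Int), Dom_calculate_bonus rolls → Spec_calculate_bonus rolls (calculate_bonus rolls)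

-- ===== LEMMAS AND PROOFS =====

/-- The fused fold computes the three small counts, the 6-count, the length and the all-even flag. -/
lemma foldB_inv (rolls : List Int) (c1 c2 c3 c6 n : Int) (ae : Bool) :
    rolls.foldl pvStepB (c1, c2, c3, c6, n, ae) =
    (c1 + (rolls.count 1 : Int), c2 + (rolls.count 2 : Int), c3 + (rolls.count 3 : Int),
     c6 + (rolls.count 6 : Int), n + (rolls.length : Int),
     ae && rolls.all (fun d => PySem.Int.mod d 2 == 0)) := by
  induction rolls generalizing c1 c2 c3 c6 n ae with
  | nil => simp
  | cons x t ih =>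
    simp only [List.foldl_cons, List.count_cons, List.length_cons, List.all_cons, pvStepB]
    by_cases h1 : x = 1
    · subst h1
      simp only [show ((1 : Int) == 1) = true from rfl, show (PySem.Int.mod 1 2 != 0) = true from rfl, if_true]
      rw [ih]
      simp only [Prod.mk.injEq]
      refine ⟨by push_cast; ring, by push_cast; ring, by push_cast; ring, by push_cast; ring, by push_cast; ring, by simp⟩
    · by_cases h2 : x = 2
      · subst h2
        simp only [show ((2 : Int) == 1) = false from rfl, show ((2 : Int) == 2) = true from rfl,
          show (PySem.Int.mod 2 2 != 0) = false from rfl, if_true]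
        rw [ih]
        simp only [Prod.mk.injEq]
        refine ⟨by push_cast; ring, by push_cast; ring, by push_cast; ring, by push_cast; ring, by push_cast; ring, by simp⟩
      · by_cases h3 : x = 3
        · subst h3
          simp only [show ((3 : Int) == 1) = false from rfl, show ((3 : Int) == 2) = false from rfl,
            show ((3 : Int) == 3) = true from rfl, show (PySem.Int.mod 3 2 != 0) = true from rfl, if_true]
          rw [ih]
          simp only [Prod.mk.injEq]
          refine ⟨by push_cast; ring, by push_cast; ring, by push_cast; ring, by push_cast; ring, by push_cast; ring, by simp⟩
        · by_cases h6 : x = 6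
          · subst h6
            simp only [show ((6 : Int) == 1) = false from rfl, show ((6 : Int) == 2) = false from rfl,
              show ((6 : Int) == 3) = false from rfl, show ((6 : Int) == 6) = true from rfl,
              show (PySem.Int.mod 6 2 != 0) = false from rfl, if_true]
            rw [ih]
            simp only [Prod.mk.injEq]
            refine ⟨by push_cast; ring, by push_cast; ring, by push_cast; ring, by push_cast; ring, by push_cast; ring, by simp⟩
          · simp only [beq_iff_eq, h1, h2, h3, h6, if_false]
            rw [ih]
            simp only [Prod.mk.injEq]
            refine ⟨by push_cast; ring, by push_cast; ring, by push_cast; ring, by push_cast; ring, by push_cast; ring, ?_⟩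
            have hx : x % 2 = 0 ∨ x % 2 = 1 := by omega
            rcases hx with hx | hx <;>
              simp [hx]

/-- Sum of the counts of 1, 2 and 3 never exceeds the length. -/
lemma sum3_le_length (l : List Int) :
    l.count 1 + l.count 2 + l.count 3 ≤ l.length := by
  induction l with
  | nil => simp
  | cons a t ih =>
    simp only [List.count_cons, List.length_cons]
    by_cases h1 : a = 1 <;> by_cases h2 : a = 2 <;> by_cases h3 : a = 3 <;>
      simp_all <;> omega

/-- If the counts of 1, 2 and 3 exhaust the length, every element is 1, 2 or 3. -/
lemma mem_of_counts (l : List Int)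
    (h : l.count 1 + l.count 2 + l.count 3 = l.length) :
    ∀ x ∈ l, x = 1 ∨ x = 2 ∨ x = 3 := by
  induction l with
  | nil => simp
  | cons a t ih =>
    simp only [List.count_cons, List.length_cons] at h
    by_cases h1 : a = 1 <;> by_cases h2 : a = 2 <;> by_cases h3 : a = 3 <;>
      simp_all
    · intro x hx; exact ih (by omega) x hx
    · intro x hx; exact ih (by omega) x hx
    · intro x hx; exact ih (by omega) x hx
    · have := sum3_le_length t; omega

/-- Python's `sorted(rolls) == [1, 2, 3]` in terms of length and counts. -/
lemma sorted_eq_123_iff (rolls : List Int) :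
    PySem.List.sorted rolls (fun x => x) false = [1, 2, 3] ↔
    (rolls.length = 3 ∧ rolls.count 1 = 1 ∧ rolls.count 2 = 1 ∧ rolls.count 3 = 1) := by
  constructor
  · intro h
    have hp : ([1, 2, 3] : List Int).Perm rolls := h ▸ PySem.List.sorted_perm rolls (fun x => x) false
    refine ⟨by simpa using hp.length_eq.symm, ?_, ?_, ?_⟩ <;> simp [← hp.count_eq]
  · rintro ⟨hl, h1, h2, h3⟩
    have hmem : ∀ x ∈ rolls, x = 1 ∨ x = 2 ∨ x = 3 :=
      mem_of_counts rolls (by omega)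
    have hperm : ([1, 2, 3] : List Int).Perm rolls := by
      rw [List.perm_iff_count]
      intro a
      by_cases ha1 : a = 1
      · simp [ha1, h1]
      · by_cases ha2 : a = 2
        · simp [ha2, h2]
        · by_cases ha3 : a = 3
          · simp [ha3, h3]
          · have hnm : a ∉ rolls := fun hm => by rcases hmem a hm with h | h | h <;> simp_all
            rw [List.count_eq_zero.mpr hnm, List.count_eq_zero]
            simp [ha1, ha2, ha3]
    exact PySem.List.sorted_eq_of_perm_of_pairwise_lt rolls [1, 2, 3] (fun x => x) hperm (by decide)

/-- A's 6-bonus term is unconditionally `count * 5`. -/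
lemma six_bonus_eq (rolls : List Int) :
    (if rolls.contains 6 = true then (PySem.List.count rolls 6 : Int) * 5 else 0) =
    (rolls.count 6 : Int) * 5 := by
  by_cases hc : rolls.contains 6 = true
  · rw [if_pos hc]; simp [PySem.List.count]
  · rw [if_neg hc]
    have hnm : (6 : Int) ∉ rolls := by simpa using hc
    simp [List.count_eq_zero.mpr hnm]

-- ===== VERDICT (by name: the statement is the Claim_ definition above) =====
theorem calculate_bonus_spec : Claim_equal_calculate_bonus := by
  intro rolls _
  show calculate_bonus rolls = calculate_bonus_alt rolls
  unfold calculate_bonus calculate_bonus_alt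
  rw [foldB_inv]
  simp only [zero_add, Bool.true_and]
  rw [six_bonus_eq]
  have hb : ((PySem.List.sorted rolls (fun x => x) false) == [1, 2, 3]) =
      (((rolls.length : Int) == 3) && (((rolls.count 1 : Nat) : Int) == 1) &&
       (((rolls.count 2 : Nat) : Int) == 1) && (((rolls.count 3 : Nat) : Int) == 1)) := by
    rw [Bool.eq_iff_iff]
    simp only [beq_iff_eq, Bool.and_eq_true]
    rw [sorted_eq_123_iff]
    constructor
    · rintro ⟨hl, h1, h2, h3⟩
      refine ⟨⟨⟨?_, ?_⟩, ?_⟩, ?_⟩ <;> omega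
    · rintro ⟨⟨⟨hl, h1⟩, h2⟩, h3⟩
      refine ⟨?_, ?_, ?_, ?_⟩ <;> omega
  rw [hb]
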